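-- pv_equiv track=rewrite | github.com/akmoney1110/prediction | matches/train_minutes.py | _first_last_goal_from_minutes
-- ===== SOURCE A (Python) =====
-- from typing import List, Dict, Tuple, Optional
--
-- def _first_last_goal_from_minutes(mj: Dict[str, List[int]], tmax: int) -> Tuple[Optional[int], Optional[str],
--                                                                                 Optional[int], Optional[str]]:
--     """Extract first/last goal minute & side; clamp to tmax."""
--     if not mj:
--         return None, None, None, None
--
--     def clean(v):
--         mm = []
--         for x in (v or []):
--             try:
--                 xi = int(x)
--             except Exception:
--                 continue
--             if 1 <= xi <= 120:
--                 mm.append(min(xi, tmax))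
--         return sorted(mm)
--
--     H = clean(mj.get("goal_minutes_home", []))
--     A = clean(mj.get("goal_minutes_away", []))
--     ev = [(m, "H") for m in H] + [(m, "A") for m in A]
--     if not ev:
--         return None, None, None, None
--     ev.sort(key=lambda t: (t[0], 0 if t[1] == "H" else 1))
--     return ev[0][0], ev[0][1], ev[-1][0], ev[-1][1]
-- ===== SOURCE B (Python) =====
-- from typing import List, Dict, Tuple, Optional
--
-- def _first_last_goal_from_minutes(mj: Dict[str, List[int]], tmax: int) -> Tuple[Optional[int], Optional[str],
--                                                                                 Optional[int], Optional[str]]: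
--     """Single pass per side: track (min, max) of the cleaned minutes, no sorting."""
--     if not mj:
--         return None, None, None, None
--
--     def minmax(v):
--         bounds = None
--         for x in (v or []):
--             try:
--                 xi = int(x)
--             except Exception:
--                 continue
--             if 1 <= xi <= 120:
--                 m = min(xi, tmax)
--                 if bounds is None:
--                     bounds = (m, m)
--                 else:
--                     bounds = (min(bounds[0], m), max(bounds[1], m))
--         return bounds
--
--     h = minmax(mj.get("goal_minutes_home", []))
--     a = minmax(mj.get("goal_minutes_away", []))
--     if h is None and a is None:
--         return None, None, None, None
--     if a is None:
--         return h[0], "H", h[1], "H"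
--     if h is None:
--         return a[0], "A", a[1], "A"
--     first, fside = (h[0], "H") if h[0] <= a[0] else (a[0], "A")
--     last, lside = (a[1], "A") if h[1] <= a[1] else (h[1], "H")
--     return first, fside, last, lside
-- ===== Notes on version B (the rewrite author's own statement) =====
-- stated objective: alternative
-- what changed: Instead of building, sorting and indexing a combined event list, B makes one linear min/max pass over each side's cleaned minutes and combines the two (min,max) pairs with the H-first/A-last tie-break.
import Mathlib
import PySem

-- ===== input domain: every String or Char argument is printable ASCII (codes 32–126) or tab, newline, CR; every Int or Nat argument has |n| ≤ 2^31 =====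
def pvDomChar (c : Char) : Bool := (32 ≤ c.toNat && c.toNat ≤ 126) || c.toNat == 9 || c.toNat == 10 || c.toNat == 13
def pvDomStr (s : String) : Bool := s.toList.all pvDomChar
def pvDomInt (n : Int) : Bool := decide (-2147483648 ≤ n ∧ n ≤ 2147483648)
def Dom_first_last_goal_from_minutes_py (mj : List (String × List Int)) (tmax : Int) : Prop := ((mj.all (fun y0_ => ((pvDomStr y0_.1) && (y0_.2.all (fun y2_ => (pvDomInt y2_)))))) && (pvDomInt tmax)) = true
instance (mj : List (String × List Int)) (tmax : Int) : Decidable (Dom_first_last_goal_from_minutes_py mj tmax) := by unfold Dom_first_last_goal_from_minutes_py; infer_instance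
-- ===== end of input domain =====

-- B replaces A's build-sort-index of a combined event list by one linear min/max pass
-- per side, combined with the same H-first / A-last tie-break (alternative algorithm).


-- ===== PORT A =====
-- clean(v): int(x) on an int is the identity and never raises, so the try/except is the
-- plain loop body; 'v or []' is v when v is nonempty, [] otherwise.
def pvClean (v : List Int) (tmax : Int) : List Int :=
  PySem.List.sorted
    ((if v = [] then [] else v).foldl
      (fun mm x => if 1 ≤ x ∧ x ≤ 120 then mm ++ [min x tmax] else mm) [])
    (fun x => x) false

def first_last_goal_from_minutes_py (mj : List (String × List Int)) (tmax : Int) :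
    Option Int × Option String × Option Int × Option String :=
  if mj = [] then (none, none, none, none)
  else
    let H := pvClean (PySem.Dict.getD (PySem.Dict.mk mj) "goal_minutes_home" []) tmax
    let A := pvClean (PySem.Dict.getD (PySem.Dict.mk mj) "goal_minutes_away" []) tmax
    let ev := H.map (fun m => (m, "H")) ++ A.map (fun m => (m, "A"))
    if ev = [] then (none, none, none, none)
    else
      let s := PySem.List.sorted2 ev (fun t => t.1)
        (fun t => if t.2 == "H" then (0 : Int) else 1) false
      ((PySem.List.pyGet? s 0).map (·.1), (PySem.List.pyGet? s 0).map (·.2),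
       (PySem.List.pyGet? s (-1)).map (·.1), (PySem.List.pyGet? s (-1)).map (·.2))

-- ===== PORT B =====
def pvMinMax (v : List Int) (tmax : Int) : Option (Int × Int) :=
  (if v = [] then [] else v).foldl
    (fun bounds x =>
      if 1 ≤ x ∧ x ≤ 120 then
        match bounds with
        | none => some (min x tmax, min x tmax)
        | some (lo, hi) => some (min lo (min x tmax), max hi (min x tmax))
      else bounds)
    none

def first_last_goal_from_minutes_py_alt (mj : List (String × List Int)) (tmax : Int) :
    Option Int × Option String × Option Int × Option String :=
  if mj = [] then (none, none, none, none)
  else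
    match pvMinMax (PySem.Dict.getD (PySem.Dict.mk mj) "goal_minutes_home" []) tmax,
          pvMinMax (PySem.Dict.getD (PySem.Dict.mk mj) "goal_minutes_away" []) tmax with
    | none, none => (none, none, none, none)
    | some h, none => (some h.1, some "H", some h.2, some "H")
    | none, some a => (some a.1, some "A", some a.2, some "A")
    | some h, some a =>
      let f := if h.1 ≤ a.1 then (h.1, "H") else (a.1, "A")
      let l := if h.2 ≤ a.2 then (a.2, "A") else (h.2, "H")
      (some f.1, some f.2, some l.1, some l.2)

-- ===== PRECONDITION & SPEC =====
def Spec_first_last_goal_from_minutes_py (mj : List (String × List Int)) (tmax : Int) (out : Option Int × Option String × Option Int × Option String) : Prop := out = first_last_goal_from_minutes_py_alt mj tmax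
instance (mj : List (String × List Int)) (tmax : Int) (out : Option Int × Option String × Option Int × Option String) : Decidable (Spec_first_last_goal_from_minutes_py mj tmax out) := by unfold Spec_first_last_goal_from_minutes_py; infer_instance

-- ===== CLAIM (what is proved, stated in full; the proofs are below) =====
def Claim_equal_first_last_goal_from_minutes_py : Prop := ∀ (mj : List (String × List Int)) (tmax : Int), Dom_first_last_goal_from_minutes_py mj tmax → Spec_first_last_goal_from_minutes_py mj tmax (first_last_goal_from_minutes_py mj tmax)

-- ===== LEMMAS AND PROOFS =====

-- the cleaned (unsorted) minute list
def pvCleanL (v : List Int) (tmax : Int) : List Int :=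
  (v.filter (fun x => decide (1 ≤ x ∧ x ≤ 120))).map (fun x => min x tmax)

-- the single Int key that sorted2's lexicographic (minute, side-bit) key amounts to
def pvKey (t : Int × String) : Int := 2 * t.1 + (if t.2 == "H" then 0 else 1)

lemma pvClean_eq (v : List Int) (tmax : Int) :
    pvClean v tmax = PySem.List.sorted (pvCleanL v tmax) (fun x => x) false := by
  unfold pvClean pvCleanL
  rcases eq_or_ne v [] with h | h
  · simp [h]
  · rw [if_neg h, PySem.List.foldl_append_ite (p := fun x => 1 ≤ x ∧ x ≤ 120)
      (f := fun x => min x tmax)]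
    simp

lemma pvSorted2_eq (ev : List (Int × String)) :
    PySem.List.sorted2 ev (fun t => t.1) (fun t => if t.2 == "H" then (0 : Int) else 1) false
      = PySem.List.sorted ev pvKey false := by
  have h : (fun (a b : Int × String) => decide (a.1 < b.1) ||
      (!decide (b.1 < a.1) && decide ((if a.2 == "H" then (0 : Int) else 1)
        < (if b.2 == "H" then (0 : Int) else 1))))
      = fun a b => decide (pvKey a < pvKey b) := by
    funext a b
    unfold pvKey
    by_cases ha : a.2 == "H" <;> by_cases hb : b.2 == "H" <;>
      · simp only [ha, hb, if_pos, if_neg, Bool.not_eq_true]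
        rw [Bool.eq_iff_iff]
        simp only [Bool.or_eq_true, Bool.and_eq_true, Bool.not_eq_eq_eq_not, Bool.not_true,
          decide_eq_false_iff_not, decide_eq_true_iff]
        omega
  show ev.foldl (fun acc x => PySem.List.insertBy _ x acc) [] = _
  rw [h, PySem.List.sorted_eq_foldl_insertBy]
  rfl

lemma pvMinMax_char (v : List Int) (tmax : Int) :
    pvMinMax v tmax = match pvCleanL v tmax with
      | [] => none
      | m :: t => some (t.foldl min m, t.foldl max m) := by
  unfold pvMinMax pvCleanL
  have hv : (if v = [] then [] else v) = v := by rcases eq_or_ne v [] with h | h <;> simp [h]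
  rw [hv]
  refine Eq.trans (PySem.List.foldl_ite_eq_foldl_filter (fun x => 1 ≤ x ∧ x ≤ 120)
    (fun bounds x => match bounds with
      | none => some (min x tmax, min x tmax)
      | some (lo, hi) => some (min lo (min x tmax), max hi (min x tmax))) v none) ?_
  refine Eq.trans (List.foldl_map (f := fun x => min x tmax)
    (g := fun bounds m => match bounds with
      | none => some (m, m)
      | some (lo, hi) => some (min lo m, max hi m))
    (l := List.filter (fun x => decide (1 ≤ x ∧ x ≤ 120)) v) (init := none)).symm ?_
  generalize (List.map (fun x => min x tmax) (List.filter (fun x => decide (1 ≤ x ∧ x ≤ 120)) v)) = c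
  cases c with
  | nil => rfl
  | cons m t =>
    simp only [List.foldl_cons]
    suffices h : ∀ (t : List Int) (lo hi : Int),
        t.foldl (fun bounds m => match bounds with
          | none => some (m, m)
          | some (lo, hi) => some (min lo m, max hi m)) (some (lo, hi))
          = some (t.foldl min lo, t.foldl max hi) by
      exact h t m m
    intro t
    induction t with
    | nil => intro lo hi; rfl
    | cons y t ih => intro lo hi; simp only [List.foldl_cons]; exact ih (min lo y) (max hi y)

-- head and last of the key-sorted list are the key-minimal / key-maximal elements
lemma pv_first_last (ev : List (Int × String)) (p q : Int × String)
    (hside : ∀ y ∈ ev, y.2 = "H" ∨ y.2 = "A")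
    (hp : p ∈ ev) (hpmin : ∀ y ∈ ev, pvKey p ≤ pvKey y)
    (hq : q ∈ ev) (hqmax : ∀ y ∈ ev, pvKey y ≤ pvKey q) :
    ((PySem.List.pyGet? (PySem.List.sorted ev pvKey false) 0).map (·.1),
     (PySem.List.pyGet? (PySem.List.sorted ev pvKey false) 0).map (·.2),
     (PySem.List.pyGet? (PySem.List.sorted ev pvKey false) (-1)).map (·.1),
     (PySem.List.pyGet? (PySem.List.sorted ev pvKey false) (-1)).map (·.2))
      = (some p.1, some p.2, some q.1, some q.2) := by
  have hinj : ∀ a ∈ ev, ∀ b ∈ ev, pvKey a = pvKey b → a = b := by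
    intro a haev b hbev hk
    unfold pvKey at hk
    rcases hside a haev with h1 | h1 <;> rcases hside b hbev with h2 | h2 <;>
      · rw [h1, h2] at hk
        simp at hk
        first
          | (exact Prod.ext_iff.mpr ⟨by omega, h1.trans h2.symm⟩)
          | omega
  have hne : ev ≠ [] := by intro h; rw [h] at hp; exact absurd hp (List.not_mem_nil)
  have hsne : PySem.List.sorted ev pvKey false ≠ [] := by
    rw [ne_eq, PySem.List.sorted_eq_nil_iff]; exact hne
  obtain ⟨f, t, hs⟩ := List.exists_cons_of_ne_nil hsne
  have hfev : f ∈ ev := by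
    rw [← PySem.List.mem_sorted (key := pvKey) (rev := false), hs]; exact List.mem_cons_self
  have hfmin : ∀ y ∈ ev, pvKey f ≤ pvKey y := PySem.List.key_head_sorted_le _ _ hs
  have hfp : f = p := hinj f hfev p hp (le_antisymm (hfmin p hp) (hpmin f hfev))
  obtain ⟨g, hg⟩ : ∃ g, (PySem.List.sorted ev pvKey false).getLast? = some g := by
    rw [hs]; exact ⟨(f :: t).getLast (by simp), List.getLast?_eq_some_getLast _⟩
  have hgev : g ∈ ev := by
    rw [← PySem.List.mem_sorted (key := pvKey) (rev := false)]
    exact List.mem_of_getLast? hg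
  have hgmax : ∀ y ∈ ev, pvKey y ≤ pvKey g := by
    intro y hy
    obtain ⟨pre, hpre⟩ := List.getLast?_eq_some_iff.mp hg
    have hpw := PySem.List.sorted_pairwise (xs := ev) (key := pvKey)
    rw [hpre, List.pairwise_append] at hpw
    rw [← PySem.List.mem_sorted (key := pvKey) (rev := false), hpre] at hy
    rcases List.mem_append.mp hy with h | h
    · exact hpw.2.2 y h g (by simp)
    · simp at h; rw [h]
  have hgq : g = q := hinj g hgev q hq (le_antisymm (hqmax g hgev) (hgmax q hq))
  rw [hs, PySem.List.pyGet?_zero_cons, ← hs, PySem.List.pyGet?_neg_one, hg, hfp, hgq]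
  rfl

lemma pvKey_H (m : Int) : pvKey (m, "H") = 2 * m := by simp [pvKey]

lemma pvKey_A (m : Int) : pvKey (m, "A") = 2 * m + 1 := by simp [pvKey]

-- membership in the combined event list
lemma pvMem_ev (cH cA : List Int) (y : Int × String) :
    y ∈ (PySem.List.sorted cH (fun x => x) false).map (fun m => (m, "H"))
        ++ (PySem.List.sorted cA (fun x => x) false).map (fun m => (m, "A"))
      ↔ (∃ m ∈ cH, y = (m, "H")) ∨ (∃ m ∈ cA, y = (m, "A")) := by
  simp [PySem.List.mem_sorted, eq_comm]

-- min/max of a nonempty cleaned list: membership and extremality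
lemma pv_foldl_min_max (m : Int) (t : List Int) :
    t.foldl min m ∈ m :: t ∧ t.foldl max m ∈ m :: t ∧
      ∀ y ∈ m :: t, t.foldl min m ≤ y ∧ y ≤ t.foldl max m := by
  refine ⟨?_, ?_, ?_⟩
  · rcases PySem.List.foldl_min_mem t m with h | h
    · rw [h]; exact List.mem_cons_self
    · exact List.mem_cons_of_mem _ h
  · rcases PySem.List.foldl_max_mem t m with h | h
    · rw [h]; exact List.mem_cons_self
    · exact List.mem_cons_of_mem _ h
  · intro y hy
    rcases List.mem_cons.mp hy with h | h
    · rw [h]; exact ⟨(PySem.List.foldl_min_le t m).1, (PySem.List.le_foldl_max t m).1⟩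
    · exact ⟨(PySem.List.foldl_min_le t m).2 y h, (PySem.List.le_foldl_max t m).2 y h⟩

-- ===== VERDICT (by name: the statement is the Claim_ definition above) =====
theorem first_last_goal_from_minutes_py_spec : Claim_equal_first_last_goal_from_minutes_py := by
  intro mj tmax _
  unfold Spec_first_last_goal_from_minutes_py
  unfold first_last_goal_from_minutes_py first_last_goal_from_minutes_py_alt
  by_cases hmj : mj = []
  · simp [hmj]
  · rw [if_neg hmj, if_neg hmj]
    simp only [pvClean_eq, pvMinMax_char, pvSorted2_eq]
    rcases hH : pvCleanL (PySem.Dict.getD (PySem.Dict.mk mj) "goal_minutes_home" []) tmax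
      with _ | ⟨mh, th⟩ <;>
      rcases hA : pvCleanL (PySem.Dict.getD (PySem.Dict.mk mj) "goal_minutes_away" []) tmax
        with _ | ⟨ma, ta⟩
    · simp [PySem.List.sorted]
    · -- only away goals
      obtain ⟨hlomem, hhimem, hbound⟩ := pv_foldl_min_max ma ta
      rw [if_neg (by simp [PySem.List.sorted_eq_nil_iff])]
      refine pv_first_last _ (ta.foldl min ma, "A") (ta.foldl max ma, "A") ?_ ?_ ?_ ?_ ?_
      · intro y hy
        rcases (pvMem_ev _ _ y).mp hy with ⟨m, _, hm⟩ | ⟨m, _, hm⟩ <;> simp [hm]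
      · exact (pvMem_ev _ _ _).mpr (Or.inr ⟨_, hlomem, rfl⟩)
      · intro y hy
        rcases (pvMem_ev _ _ y).mp hy with ⟨m, hmm, hm⟩ | ⟨m, hmm, hm⟩
        · simp at hmm
        · have := (hbound m hmm).1
          rw [hm, pvKey_A, pvKey_A]; omega
      · exact (pvMem_ev _ _ _).mpr (Or.inr ⟨_, hhimem, rfl⟩)
      · intro y hy
        rcases (pvMem_ev _ _ y).mp hy with ⟨m, hmm, hm⟩ | ⟨m, hmm, hm⟩
        · simp at hmm
        · have := (hbound m hmm).2
          rw [hm, pvKey_A, pvKey_A]; omega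
    · -- only home goals
      obtain ⟨hlomem, hhimem, hbound⟩ := pv_foldl_min_max mh th
      rw [if_neg (by simp [PySem.List.sorted_eq_nil_iff])]
      refine pv_first_last _ (th.foldl min mh, "H") (th.foldl max mh, "H") ?_ ?_ ?_ ?_ ?_
      · intro y hy
        rcases (pvMem_ev _ _ y).mp hy with ⟨m, _, hm⟩ | ⟨m, _, hm⟩ <;> simp [hm]
      · exact (pvMem_ev _ _ _).mpr (Or.inl ⟨_, hlomem, rfl⟩)
      · intro y hy
        rcases (pvMem_ev _ _ y).mp hy with ⟨m, hmm, hm⟩ | ⟨m, hmm, hm⟩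
        · have := (hbound m hmm).1
          rw [hm, pvKey_H, pvKey_H]; omega
        · simp at hmm
      · exact (pvMem_ev _ _ _).mpr (Or.inl ⟨_, hhimem, rfl⟩)
      · intro y hy
        rcases (pvMem_ev _ _ y).mp hy with ⟨m, hmm, hm⟩ | ⟨m, hmm, hm⟩
        · have := (hbound m hmm).2
          rw [hm, pvKey_H, pvKey_H]; omega
        · simp at hmm
    · -- goals on both sides
      obtain ⟨hHlomem, hHhimem, hHbound⟩ := pv_foldl_min_max mh th
      obtain ⟨hAlomem, hAhimem, hAbound⟩ := pv_foldl_min_max ma ta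
      rw [if_neg (by simp [PySem.List.sorted_eq_nil_iff])]
      refine pv_first_last _
        (if th.foldl min mh ≤ ta.foldl min ma then (th.foldl min mh, "H")
          else (ta.foldl min ma, "A"))
        (if th.foldl max mh ≤ ta.foldl max ma then (ta.foldl max ma, "A")
          else (th.foldl max mh, "H")) ?_ ?_ ?_ ?_ ?_
      · intro y hy
        rcases (pvMem_ev _ _ y).mp hy with ⟨m, _, hm⟩ | ⟨m, _, hm⟩ <;> simp [hm]
      · split_ifs
        · exact (pvMem_ev _ _ _).mpr (Or.inl ⟨_, hHlomem, rfl⟩)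
        · exact (pvMem_ev _ _ _).mpr (Or.inr ⟨_, hAlomem, rfl⟩)
      · intro y hy
        rcases (pvMem_ev _ _ y).mp hy with ⟨m, hmm, hm⟩ | ⟨m, hmm, hm⟩ <;>
          [have hb := (hHbound m hmm).1; have hb := (hAbound m hmm).1] <;>
          subst hm <;> split_ifs with hcmp <;>
          simp only [pvKey_H, pvKey_A] <;> omega
      · split_ifs
        · exact (pvMem_ev _ _ _).mpr (Or.inr ⟨_, hAhimem, rfl⟩)
        · exact (pvMem_ev _ _ _).mpr (Or.inl ⟨_, hHhimem, rfl⟩)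
      · intro y hy
        rcases (pvMem_ev _ _ y).mp hy with ⟨m, hmm, hm⟩ | ⟨m, hmm, hm⟩ <;>
          [have hb := (hHbound m hmm).2; have hb := (hAbound m hmm).2] <;>
          subst hm <;> split_ifs with hcmp <;>
          simp only [pvKey_H, pvKey_A] <;> omega
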